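-- pv_equiv track=rewrite | github.com/munechika-koyo/cherab_lhd | cherab/lhd/emitter/E3E/utils.py | generate_faces
-- ===== SOURCE A (Python) =====
-- def generate_faces(num_rad, num_pol, zone="zone0"):
--     """generate cell indeces
--
--     Parameters
--     ----------
--     num_rad : dict
--         the number of grids along the radial direction
--     num_pol : dict
--         the number of grids along the poloidal direction
--     zone : str, optional
--         label of zones, by default "zone0"
--
--     Returns
--     -------
--     list
--         containing face indeces
--     """
--     faces = []
--     start = 0
--     N_rad = num_rad[zone]
--     N_pol = num_pol[zone]
--
--     while start < N_rad * (N_pol - 1):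
--         for i in range(start, start + N_rad - 1):
--             faces += [(i, i + 1, i + 1 + N_rad, i + N_rad)]
--         start += N_rad
--     if zone in ["zone0", "zone11"]:
--         for i in range(start, start + N_rad - 1):
--             faces += [(i, i + 1, i - start + 1, i - start)]
--     return faces
-- ===== SOURCE B (Python) =====
-- def generate_faces(num_rad, num_pol, zone="zone0"):
--     """Two-stage construction: build one prototype row of quads once, then
--     stamp a translated copy of it onto each poloidal row; for closed zones
--     (zone0/zone11) the next-row corners are reduced modulo the grid size,
--     which makes the last row wrap back to row 0."""
--     N_rad = num_rad[zone]
--     N_pol = num_pol[zone]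
--     template = [(c, c + 1, N_rad + c + 1, N_rad + c) for c in range(N_rad - 1)]
--     closed = zone in ("zone0", "zone11")
--     rows = N_pol if closed else N_pol - 1
--     size = N_rad * N_pol
--     faces = []
--     for j in range(rows):
--         off = j * N_rad
--         if closed:
--             faces += [(a + off, b + off, (c + off) % size, (d + off) % size)
--                       for (a, b, c, d) in template]
--         else:
--             faces += [(a + off, b + off, c + off, d + off)
--                       for (a, b, c, d) in template]
--     return faces
-- ===== Notes on version B (the rewrite author's own statement) =====
-- stated objective: alternative
-- what changed: Two-stage template construction: one prototype row of quads is built once and then stamped onto each poloidal row by an affine offset, with closed zones wrapping the next-row corners by reduction modulo the grid size, replacing A's while-loop that regenerates every tuple from running offsets plus a trailing wrap-around special-case block.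
-- intended difference: On closed zones (zone0/zone11) with N_pol <= 0 and N_rad >= 2 A still returns N_rad-1 degenerate faces wrapping the nonexistent row 0 onto itself, while B returns [], the intended empty face list for a grid with no poloidal rows. — e.g. on generate_faces([("zone0", 2)], [("zone0", 0)], "zone0"): A returns [(0, 1, 1, 0)], B returns []
import Mathlib
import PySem

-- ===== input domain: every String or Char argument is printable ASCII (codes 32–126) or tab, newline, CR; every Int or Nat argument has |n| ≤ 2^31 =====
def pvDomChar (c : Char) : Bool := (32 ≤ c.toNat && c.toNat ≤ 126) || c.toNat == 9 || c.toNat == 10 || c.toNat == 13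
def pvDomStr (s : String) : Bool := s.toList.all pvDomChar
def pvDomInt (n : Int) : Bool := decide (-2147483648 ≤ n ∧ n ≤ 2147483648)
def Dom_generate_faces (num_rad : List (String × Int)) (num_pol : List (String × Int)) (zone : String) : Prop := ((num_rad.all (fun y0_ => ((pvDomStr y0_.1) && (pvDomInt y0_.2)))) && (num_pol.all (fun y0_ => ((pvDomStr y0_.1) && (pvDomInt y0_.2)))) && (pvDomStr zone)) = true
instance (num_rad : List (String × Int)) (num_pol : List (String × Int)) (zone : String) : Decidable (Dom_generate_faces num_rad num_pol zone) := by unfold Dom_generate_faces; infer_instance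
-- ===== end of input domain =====

-- B builds one prototype row of quads once and stamps a translated copy onto each poloidal row,
-- wrapping closed zones by reduction modulo the grid size, instead of A's while-loop over
-- running offsets plus a trailing wrap-around special case (objective: alternative).

-- ===== PORT A =====
-- inner 'for i in range(start, start + N_rad - 1): faces += [(i, i+1, i+1+N_rad, i+N_rad)]'
def faceRowA (Nrad start : Int) (faces : List (Int × Int × Int × Int)) : List (Int × Int × Int × Int) :=
  (PySem.List.pyRange start (start + Nrad - 1) 1).foldl
    (fun acc i => acc ++ [(i, i + 1, i + 1 + Nrad, i + Nrad)]) faces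

-- the while loop; whenever it terminates it runs exactly max(N_pol-1, 0) iterations, so the
-- fuel (N_pol-1).toNat is exact; on the divergent inputs (N_rad < 0 ∧ N_pol ≤ 0, outside Pre_)
-- the fuel merely makes the port total.
def whileA : Nat → Int → Int → Int → List (Int × Int × Int × Int) → List (Int × Int × Int × Int) × Int
  | 0, _, _, start, faces => (faces, start)
  | fuel + 1, Nrad, Npol, start, faces =>
    if start < Nrad * (Npol - 1) then
      whileA fuel Nrad Npol (start + Nrad) (faceRowA Nrad start faces)
    else (faces, start)

def generate_faces (num_rad : List (String × Int)) (num_pol : List (String × Int)) (zone : String) : List (Int × Int × Int × Int) :=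
  match (PySem.Dict.mk num_rad).get? zone, (PySem.Dict.mk num_pol).get? zone with
  | some Nrad, some Npol =>
    let res := whileA (Npol - 1).toNat Nrad Npol 0 []
    let faces := res.1
    let start := res.2
    if zone = "zone0" ∨ zone = "zone11" then
      (PySem.List.pyRange start (start + Nrad - 1) 1).foldl
        (fun acc i => acc ++ [(i, i + 1, i - start + 1, i - start)]) faces
    else faces
  | _, _ => []  -- KeyError in Python; excluded by Pre_

-- ===== PORT B =====

def generate_faces_alt (num_rad : List (String × Int)) (num_pol : List (String × Int)) (zone : String) : List (Int × Int × Int × Int) :=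
  match (PySem.Dict.mk num_rad).get? zone with
  | none => []  -- KeyError in Python; excluded by Pre_
  | some Nrad =>
    match (PySem.Dict.mk num_pol).get? zone with
    | none => []  -- KeyError in Python; excluded by Pre_
    | some Npol =>
    let template := (PySem.List.pyRange 0 (Nrad - 1) 1).map
      (fun c => (c, c + 1, Nrad + c + 1, Nrad + c))
    let closed := zone == "zone0" || zone == "zone11"
    let rows := if closed then Npol else Npol - 1
    let size := Nrad * Npol
    (PySem.List.pyRange 0 rows 1).foldl (fun faces j =>
      let off := j * Nrad
      if closed then
        faces ++ template.map (fun q : Int × Int × Int × Int =>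
          (q.1 + off, q.2.1 + off, PySem.Int.mod (q.2.2.1 + off) size, PySem.Int.mod (q.2.2.2 + off) size))
      else
        faces ++ template.map (fun q : Int × Int × Int × Int =>
          (q.1 + off, q.2.1 + off, q.2.2.1 + off, q.2.2.2 + off))) []

-- ===== PRECONDITION & SPEC =====
-- Pre_ excludes inputs where Python A raises KeyError (zone missing from either dict) and the
-- inputs N_rad < 0 ∧ N_pol ≤ 0 on which A's while loop never terminates.
def Pre_generate_faces (num_rad : List (String × Int)) (num_pol : List (String × Int)) (zone : String) : Prop :=
  ((PySem.Dict.mk num_rad).get? zone).isSome = true ∧ ((PySem.Dict.mk num_pol).get? zone).isSome = true ∧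
  (0 ≤ ((PySem.Dict.mk num_rad).get? zone).getD 0 ∨ 1 ≤ ((PySem.Dict.mk num_pol).get? zone).getD 0)
instance (num_rad : List (String × Int)) (num_pol : List (String × Int)) (zone : String) : Decidable (Pre_generate_faces num_rad num_pol zone) := by unfold Pre_generate_faces; infer_instance

def pvWitness_generate_faces : (List (String × Int)) × (List (String × Int)) × String :=
  ([("zone0", 3)], [("zone0", 2)], "zone0")

-- On closed zones (zone0/zone11) with N_pol ≤ 0 and N_rad ≥ 2, A returns N_rad-1 degenerate
-- faces wrapping the nonexistent row 0 onto itself, while B returns [], the intended empty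
-- face list for a grid with no poloidal rows.
def D_generate_faces (num_rad : List (String × Int)) (num_pol : List (String × Int)) (zone : String) : Prop :=
  (zone = "zone0" ∨ zone = "zone11") ∧
  ((PySem.Dict.mk num_rad).get? zone).isSome = true ∧ ((PySem.Dict.mk num_pol).get? zone).isSome = true ∧
  2 ≤ ((PySem.Dict.mk num_rad).get? zone).getD 0 ∧ ((PySem.Dict.mk num_pol).get? zone).getD 0 ≤ 0
instance (num_rad : List (String × Int)) (num_pol : List (String × Int)) (zone : String) : Decidable (D_generate_faces num_rad num_pol zone) := by unfold D_generate_faces; infer_instance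

def Spec_generate_faces (num_rad : List (String × Int)) (num_pol : List (String × Int)) (zone : String) (out : List (Int × Int × Int × Int)) : Prop := ¬ D_generate_faces num_rad num_pol zone → out = generate_faces_alt num_rad num_pol zone
instance (num_rad : List (String × Int)) (num_pol : List (String × Int)) (zone : String) (out : List (Int × Int × Int × Int)) : Decidable (Spec_generate_faces num_rad num_pol zone out) := by unfold Spec_generate_faces; infer_instance

def pvDiffWitness_generate_faces : (List (String × Int)) × (List (String × Int)) × String :=
  ([("zone0", 2)], [("zone0", 0)], "zone0")
def pvDiffWitnessOut_generate_faces : (List (Int × Int × Int × Int)) × (List (Int × Int × Int × Int)) :=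
  ([(0, 1, 1, 0)], [])

-- ===== CLAIM (what is proved, stated in full; the proofs are below) =====
def Claim_unchanged_generate_faces : Prop := ∀ (num_rad : List (String × Int)) (num_pol : List (String × Int)) (zone : String), Dom_generate_faces num_rad num_pol zone → Pre_generate_faces num_rad num_pol zone → Spec_generate_faces num_rad num_pol zone (generate_faces num_rad num_pol zone)
def Claim_changed_generate_faces : Prop := Dom_generate_faces (pvDiffWitness_generate_faces.1) (pvDiffWitness_generate_faces.2.1) (pvDiffWitness_generate_faces.2.2) ∧ Pre_generate_faces (pvDiffWitness_generate_faces.1) (pvDiffWitness_generate_faces.2.1) (pvDiffWitness_generate_faces.2.2) ∧ D_generate_faces (pvDiffWitness_generate_faces.1) (pvDiffWitness_generate_faces.2.1) (pvDiffWitness_generate_faces.2.2) ∧ generate_faces (pvDiffWitness_generate_faces.1) (pvDiffWitness_generate_faces.2.1) (pvDiffWitness_generate_faces.2.2) = pvDiffWitnessOut_generate_faces.1 ∧ generate_faces_alt (pvDiffWitness_generate_faces.1) (pvDiffWitness_generate_faces.2.1) (pvDiffWitness_generate_faces.2.2) = pvDiffWitnessOut_generate_faces.2 ∧ pvDiffWitnessOut_generate_faces.1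 ≠ pvDiffWitnessOut_generate_faces.2
def Claim_exact_generate_faces : Prop := ∀ (num_rad : List (String × Int)) (num_pol : List (String × Int)) (zone : String), Dom_generate_faces num_rad num_pol zone → Pre_generate_faces num_rad num_pol zone → D_generate_faces num_rad num_pol zone → generate_faces num_rad num_pol zone ≠ generate_faces_alt num_rad num_pol zone

-- ===== LEMMAS AND PROOFS =====

-- one poloidal row of faces: radial steps c = 0..r-2, current row offset base, next row offset nxt
def mkRow (r base nxt : Int) : List (Int × Int × Int × Int) :=
  (PySem.List.pyRange 0 (r - 1) 1).map (fun c => (base + c, base + c + 1, nxt + c + 1, nxt + c))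

theorem mkRow_of_le_one (r base nxt : Int) (h : r ≤ 1) : mkRow r base nxt = [] := by
  unfold mkRow
  rw [PySem.List.pyRange_one_eq_nil (by omega)]
  rfl

theorem map_pyRange_row (lo r base nxt : Int) (f : Int → Int × Int × Int × Int)
    (hf : ∀ c : Nat, f (lo + c) = (base + c, base + c + 1, nxt + c + 1, nxt + c)) :
    (PySem.List.pyRange lo (lo + r - 1) 1).map f = mkRow r base nxt := by
  unfold mkRow
  rw [PySem.List.pyRange_one, PySem.List.pyRange_one, List.map_map, List.map_map]
  have h2 : lo + r - 1 - lo = r - 1 - 0 := by ring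
  rw [h2]
  apply List.map_congr_left
  intro k _
  simp only [Function.comp_apply, zero_add]
  rw [hf k]

theorem faceRowA_eq (r start : Int) (faces : List (Int × Int × Int × Int)) :
    faceRowA r start faces = faces ++ mkRow r start (start + r) := by
  unfold faceRowA
  rw [PySem.List.foldl_append_singleton_eq_map]
  congr 1
  apply map_pyRange_row
  intro c
  refine Prod.ext ?_ (Prod.ext ?_ (Prod.ext ?_ ?_)) <;> simp <;> ring

theorem pv_flatMap_congr {α β : Type} (l : List α) (f g : α → List β)
    (h : ∀ x ∈ l, f x = g x) : l.flatMap f = l.flatMap g := by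
  induction l with
  | nil => rfl
  | cons a t ih =>
      simp only [List.flatMap_cons]
      rw [h a (by simp), ih (fun x hx => h x (by simp [hx]))]

theorem mkRow_congr (r a b a' b' : Int) (ha : a = a') (hb : b = b') :
    mkRow r a b = mkRow r a' b' := by rw [ha, hb]

theorem whileA_run (r p : Int) (hr : 0 < r) :
    ∀ (k : Nat) (start : Int) (faces : List (Int × Int × Int × Int)),
      start + r * k = r * (p - 1) →
      whileA k r p start faces =
        (faces ++ (List.range k).flatMap
            (fun (j : Nat) => mkRow r (start + r * (j : Int)) (start + r * ((j : Int) + 1))),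
          r * (p - 1)) := by
  intro k
  induction k with
  | zero =>
      intro start faces h
      simp at h
      simp [whileA, h]
  | succ k ih =>
      intro start faces h
      have hcast : start + r * ((k : Int) + 1) = r * (p - 1) := by push_cast at h; linarith
      have hcond : start < r * (p - 1) := by nlinarith [Int.natCast_nonneg k]
      rw [whileA, if_pos hcond, faceRowA_eq]
      have h' : (start + r) + r * k = r * (p - 1) := by push_cast; linarith
      rw [ih (start + r) _ h', List.append_assoc]
      congr 1
      rw [List.range_succ_eq_map]
      simp only [List.flatMap_cons, List.flatMap_map]
      congr 1
      congr 1
      · exact mkRow_congr _ _ _ _ _ (by push_cast; ring) (by push_cast; ring)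
      · apply pv_flatMap_congr
        intro j _
        exact mkRow_congr _ _ _ _ _ (by push_cast; ring) (by push_cast; ring)

theorem whileA_stop (r p : Int) (h : r * (p - 1) ≤ 0) (fuel : Nat)
    (faces : List (Int × Int × Int × Int)) : whileA fuel r p 0 faces = (faces, 0) := by
  cases fuel with
  | zero => rfl
  | succ n => rw [whileA, if_neg (by omega)]

theorem wrapA_eq (r start : Int) (faces : List (Int × Int × Int × Int)) :
    (PySem.List.pyRange start (start + r - 1) 1).foldl
      (fun acc i => acc ++ [(i, i + 1, i - start + 1, i - start)]) faces
    = faces ++ mkRow r start 0 := by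
  rw [PySem.List.foldl_append_singleton_eq_map]
  congr 1
  apply map_pyRange_row
  intro c
  refine Prod.ext ?_ (Prod.ext ?_ (Prod.ext ?_ ?_)) <;> simp <;> ring

-- characterization of port A when the loop runs to completion (0 < r, 1 ≤ p)
theorem A_char (num_rad num_pol : List (String × Int)) (zone : String) (r p : Int)
    (h1 : (PySem.Dict.mk num_rad).get? zone = some r) (h2 : (PySem.Dict.mk num_pol).get? zone = some p)
    (hr : 0 < r) (hp : 1 ≤ p) :
    generate_faces num_rad num_pol zone =
      (List.range (p - 1).toNat).flatMap
        (fun (j : Nat) => mkRow r (r * (j : Int)) (r * ((j : Int) + 1)))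
      ++ (if zone = "zone0" ∨ zone = "zone11" then mkRow r (r * (p - 1)) 0 else []) := by
  have hk : (0 : Int) + r * ((p - 1).toNat : Int) = r * (p - 1) := by
    have : ((p - 1).toNat : Int) = p - 1 := by omega
    rw [this]; ring
  simp only [generate_faces, h1, h2]
  rw [whileA_run r p hr _ 0 [] hk]
  have hmain : (List.range (p - 1).toNat).flatMap
        (fun (j : Nat) => mkRow r (0 + r * (j : Int)) (0 + r * ((j : Int) + 1)))
      = (List.range (p - 1).toNat).flatMap
        (fun (j : Nat) => mkRow r (r * (j : Int)) (r * ((j : Int) + 1))) := by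
    apply pv_flatMap_congr; intro j _; norm_num
  split
  · rw [wrapA_eq]
    simp only [List.nil_append]
    rw [hmain]
  · simp only [List.nil_append, List.append_nil]
    rw [hmain]

-- characterization of port A when the while loop does not run (r·(p-1) ≤ 0)
theorem A_char_stop (num_rad num_pol : List (String × Int)) (zone : String) (r p : Int)
    (h1 : (PySem.Dict.mk num_rad).get? zone = some r) (h2 : (PySem.Dict.mk num_pol).get? zone = some p)
    (h : r * (p - 1) ≤ 0) :
    generate_faces num_rad num_pol zone =
      if zone = "zone0" ∨ zone = "zone11" then mkRow r 0 0 else [] := by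
  simp only [generate_faces, h1, h2]
  rw [whileA_stop r p h]
  split
  · rw [wrapA_eq]; simp
  · rfl

-- the prototype row B builds once
def templateB (r : Int) : List (Int × Int × Int × Int) :=
  (PySem.List.pyRange 0 (r - 1) 1).map (fun c => (c, c + 1, r + c + 1, r + c))

-- characterization of port B on closed zones: flatMap of modulo-wrapped translated templates
theorem B_char_closed (num_rad num_pol : List (String × Int)) (zone : String) (r p : Int)
    (h1 : (PySem.Dict.mk num_rad).get? zone = some r) (h2 : (PySem.Dict.mk num_pol).get? zone = some p)
    (hzb : (zone == "zone0" || zone == "zone11") = true) :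
    generate_faces_alt num_rad num_pol zone =
      (PySem.List.pyRange 0 p 1).flatMap (fun j =>
        (templateB r).map (fun q : Int × Int × Int × Int =>
          (q.1 + j * r, q.2.1 + j * r,
           PySem.Int.mod (q.2.2.1 + j * r) (r * p), PySem.Int.mod (q.2.2.2 + j * r) (r * p)))) := by
  simp only [generate_faces_alt, h1, h2, hzb, if_true, templateB]
  rw [PySem.List.foldl_append_eq_flatMap]
  simp

-- characterization of port B on open zones: flatMap of plainly translated templates
theorem B_char_open (num_rad num_pol : List (String × Int)) (zone : String) (r p : Int)
    (h1 : (PySem.Dict.mk num_rad).get? zone = some r) (h2 : (PySem.Dict.mk num_pol).get? zone = some p)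
    (hzb : (zone == "zone0" || zone == "zone11") = false) :
    generate_faces_alt num_rad num_pol zone =
      (PySem.List.pyRange 0 (p - 1) 1).flatMap (fun j =>
        (templateB r).map (fun q : Int × Int × Int × Int =>
          (q.1 + j * r, q.2.1 + j * r, q.2.2.1 + j * r, q.2.2.2 + j * r))) := by
  simp only [generate_faces_alt, h1, h2, hzb, Bool.false_eq_true, if_false, templateB]
  rw [PySem.List.foldl_append_eq_flatMap]
  simp

theorem templateB_of_le_one (r : Int) (h : r ≤ 1) : templateB r = [] := by
  unfold templateB
  rw [PySem.List.pyRange_one_eq_nil (by omega)]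
  rfl

-- a plainly translated template is one row of faces
theorem rowB_open_eq (r off : Int) :
    (templateB r).map (fun q : Int × Int × Int × Int =>
        (q.1 + off, q.2.1 + off, q.2.2.1 + off, q.2.2.2 + off))
    = mkRow r off (off + r) := by
  unfold templateB mkRow
  rw [List.map_map]
  apply List.map_congr_left
  intro c _
  refine Prod.ext ?_ (Prod.ext ?_ (Prod.ext ?_ ?_)) <;> simp <;> ring

-- a middle row of a closed zone: the modulo reduction is the identity
theorem rowB_closed_mid (r p j : Int) (hr : 2 ≤ r) (hj : 0 ≤ j) (hj2 : j + 1 < p) :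
    (templateB r).map (fun q : Int × Int × Int × Int =>
        (q.1 + j * r, q.2.1 + j * r,
         PySem.Int.mod (q.2.2.1 + j * r) (r * p), PySem.Int.mod (q.2.2.2 + j * r) (r * p)))
    = mkRow r (j * r) (j * r + r) := by
  unfold templateB mkRow
  rw [List.map_map]
  apply List.map_congr_left
  intro c hc
  obtain ⟨hc0, hc1⟩ := PySem.List.mem_pyRange_one.mp hc
  have hpos : (0 : Int) < r * p := by nlinarith
  have hb : (0 : Int) ≤ p - 2 - j := by omega
  have hub1 : r + c + 1 + j * r < r * p := by
    nlinarith [mul_nonneg hb (by omega : (0 : Int) ≤ r)]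
  have hm1 : PySem.Int.mod (r + c + 1 + j * r) (r * p) = r + c + 1 + j * r := by
    rw [PySem.Int.mod_eq_emod_of_pos hpos]
    exact Int.emod_eq_of_lt (by nlinarith) hub1
  have hm2 : PySem.Int.mod (r + c + j * r) (r * p) = r + c + j * r := by
    rw [PySem.Int.mod_eq_emod_of_pos hpos]
    exact Int.emod_eq_of_lt (by nlinarith) (by linarith [hub1])
  simp only [Function.comp_apply]
  rw [hm1, hm2]
  refine Prod.ext ?_ (Prod.ext ?_ (Prod.ext ?_ ?_)) <;> simp <;> ring

-- the last row of a closed zone: the modulo reduction wraps the next-row corners to row 0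
theorem rowB_closed_last (r p : Int) (hr : 2 ≤ r) (hp : 1 ≤ p) :
    (templateB r).map (fun q : Int × Int × Int × Int =>
        (q.1 + (p - 1) * r, q.2.1 + (p - 1) * r,
         PySem.Int.mod (q.2.2.1 + (p - 1) * r) (r * p), PySem.Int.mod (q.2.2.2 + (p - 1) * r) (r * p)))
    = mkRow r ((p - 1) * r) 0 := by
  unfold templateB mkRow
  rw [List.map_map]
  apply List.map_congr_left
  intro c hc
  obtain ⟨hc0, hc1⟩ := PySem.List.mem_pyRange_one.mp hc
  have hpos : (0 : Int) < r * p := by nlinarith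
  have hm1 : PySem.Int.mod (r + c + 1 + (p - 1) * r) (r * p) = c + 1 := by
    rw [PySem.Int.mod_eq_emod_of_pos hpos]
    have e : r + c + 1 + (p - 1) * r = (c + 1) + (r * p) * 1 := by ring
    rw [e, Int.add_mul_emod_self_left]
    exact Int.emod_eq_of_lt (by omega) (by nlinarith)
  have hm2 : PySem.Int.mod (r + c + (p - 1) * r) (r * p) = c := by
    rw [PySem.Int.mod_eq_emod_of_pos hpos]
    have e : r + c + (p - 1) * r = c + (r * p) * 1 := by ring
    rw [e, Int.add_mul_emod_self_left]
    exact Int.emod_eq_of_lt (by omega) (by nlinarith)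
  simp only [Function.comp_apply]
  rw [hm1, hm2]
  refine Prod.ext ?_ (Prod.ext ?_ (Prod.ext ?_ ?_)) <;> simp <;> ring

theorem flatMap_map_templateB_nil {β : Type} (r : Int) (hr : r ≤ 1) (l : List Int)
    (f : Int → (Int × Int × Int × Int) → β) :
    l.flatMap (fun j => (templateB r).map (f j)) = [] := by
  rw [templateB_of_le_one r hr]
  simp

-- ===== VERDICT (by name: the statement is the Claim_ definition above) =====
theorem generate_faces_spec : Claim_unchanged_generate_faces := by
  intro num_rad num_pol zone _ hPre hnD
  obtain ⟨hs1, hs2, hPre3⟩ := hPre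
  obtain ⟨r, h1⟩ := Option.isSome_iff_exists.mp hs1
  obtain ⟨p, h2⟩ := Option.isSome_iff_exists.mp hs2
  rw [h1, h2] at hPre3
  simp only [Option.getD_some] at hPre3
  show generate_faces num_rad num_pol zone = generate_faces_alt num_rad num_pol zone
  by_cases hz : zone = "zone0" ∨ zone = "zone11"
  · -- closed zone
    have hzb : (zone == "zone0" || zone == "zone11") = true := by
      rcases hz with h | h <;> simp [h]
    rw [B_char_closed _ _ _ r p h1 h2 hzb]
    by_cases hr : 2 ≤ r
    · by_cases hp : 1 ≤ p
      · -- main case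
        rw [A_char _ _ _ r p h1 h2 (by omega) hp, if_pos hz]
        have hsplit : PySem.List.pyRange 0 p 1
            = PySem.List.pyRange 0 (p - 1) 1 ++ [p - 1] := by
          have h' := PySem.List.pyRange_one_succ_right (a := 0) (b := p - 1) (by omega)
          have hpp : p - 1 + 1 = p := by ring
          rw [hpp] at h'
          exact h'
        rw [hsplit, List.flatMap_append]
        congr 1
        · rw [PySem.List.pyRange_one, List.flatMap_map]
          have ht : (p - 1 - 0).toNat = (p - 1).toNat := by norm_num
          rw [ht]
          apply pv_flatMap_congr
          intro j hj
          have hjlt : (j : Int) < p - 1 := by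
            have := List.mem_range.mp hj
            omega
          have e : (0 : Int) + (j : Int) = (j : Int) := by ring
          rw [e, rowB_closed_mid r p (j : Int) hr (by omega) (by omega)]
          exact mkRow_congr _ _ _ _ _ (by ring) (by ring)
        · simp only [List.flatMap_cons, List.flatMap_nil, List.append_nil]
          rw [rowB_closed_last r p hr hp]
          exact mkRow_congr _ _ _ _ _ (by ring) (by ring)
      · -- p ≤ 0: ¬D_ rules out 2 ≤ r here, contradiction
        exfalso
        apply hnD
        unfold D_generate_faces
        rw [h1, h2]
        exact ⟨hz, rfl, rfl, by simpa using hr, by simp; omega⟩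
    · -- r ≤ 1: both sides are empty
      push_neg at hr
      have hB : (PySem.List.pyRange 0 p 1).flatMap (fun j =>
          (templateB r).map (fun q : Int × Int × Int × Int =>
            (q.1 + j * r, q.2.1 + j * r,
             PySem.Int.mod (q.2.2.1 + j * r) (r * p), PySem.Int.mod (q.2.2.2 + j * r) (r * p))))
          = [] := flatMap_map_templateB_nil r (by omega) _ _
      rw [hB]
      by_cases hr1 : r = 1
      · by_cases hp : 1 ≤ p
        · rw [A_char _ _ _ r p h1 h2 (by omega) hp, if_pos hz]
          rw [mkRow_of_le_one _ _ _ (by omega)]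
          rw [pv_flatMap_congr _ _ (fun _ => [])
            (fun j _ => mkRow_of_le_one _ _ _ (by omega))]
          simp
        · rw [A_char_stop _ _ _ r p h1 h2 (by nlinarith), if_pos hz,
            mkRow_of_le_one _ _ _ (by omega)]
      · -- r ≤ 0; Pre_ gives 0 ≤ r when p ≤ 0, so loop stops either way
        have hr0 : r ≤ 0 := by omega
        have hstop : r * (p - 1) ≤ 0 := by
          rcases hPre3 with h | h
          · have : r = 0 := by omega
            simp [this]
          · nlinarith
        rw [A_char_stop _ _ _ r p h1 h2 hstop, if_pos hz,
          mkRow_of_le_one _ _ _ (by omega)]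
  · -- open zone
    have hzb : (zone == "zone0" || zone == "zone11") = false := by
      push_neg at hz
      simp [hz.1, hz.2]
    rw [B_char_open _ _ _ r p h1 h2 hzb]
    by_cases hr : 0 < r
    · by_cases hp : 1 ≤ p
      · rw [A_char _ _ _ r p h1 h2 hr hp, if_neg hz, List.append_nil]
        rw [PySem.List.pyRange_one, List.flatMap_map]
        have ht : (p - 1 - 0).toNat = (p - 1).toNat := by norm_num
        rw [ht]
        apply pv_flatMap_congr
        intro j _
        have e : (0 : Int) + (j : Int) = (j : Int) := by ring
        rw [e, rowB_open_eq]
        exact mkRow_congr _ _ _ _ _ (by ring) (by ring)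
      · rw [A_char_stop _ _ _ r p h1 h2 (by nlinarith), if_neg hz]
        rw [PySem.List.pyRange_one_eq_nil (by omega)]
        rfl
    · push_neg at hr
      have hstop : r * (p - 1) ≤ 0 := by
        rcases hPre3 with h | h
        · have : r = 0 := by omega
          simp [this]
        · nlinarith
      rw [A_char_stop _ _ _ r p h1 h2 hstop, if_neg hz]
      rw [flatMap_map_templateB_nil r (by omega)]

theorem generate_faces_changed : Claim_changed_generate_faces := by
  unfold Claim_changed_generate_faces; decide

theorem generate_faces_tight : Claim_exact_generate_faces := by
  intro num_rad num_pol zone _ _ hD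
  obtain ⟨hz, hs1, hs2, hr2, hp0⟩ := hD
  obtain ⟨r, h1⟩ := Option.isSome_iff_exists.mp hs1
  obtain ⟨p, h2⟩ := Option.isSome_iff_exists.mp hs2
  rw [h1] at hr2
  rw [h2] at hp0
  simp only [Option.getD_some] at hr2 hp0
  have hzb : (zone == "zone0" || zone == "zone11") = true := by
    rcases hz with h | h <;> simp [h]
  have hstop : r * (p - 1) ≤ 0 := by nlinarith
  rw [A_char_stop _ _ _ r p h1 h2 hstop, B_char_closed _ _ _ r p h1 h2 hzb, if_pos hz]
  rw [PySem.List.pyRange_one_eq_nil (by omega : p ≤ 0)]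
  simp only [List.flatMap_nil]
  unfold mkRow
  rw [PySem.List.pyRange_one]
  intro hcontra
  simp only [List.map_eq_nil_iff, List.range_eq_nil] at hcontra
  omega
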